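-- pv_equiv track=rewrite | github.com/Lorn888/Code-Wars | 8kyu/Flick_Switch.py | flick_switch
-- ===== SOURCE A (Python) =====
-- def flick_switch(lst):
--     new=[]
--     switch = 0
--     for item in lst:
--         if item == "flick" and switch == 0:
--             switch = 1
--         elif item == "flick" and switch == 1:
--             switch = 0
--
--         if switch == 0:
--             new.append(True)
--         elif switch == 1:
--             new.append(False)
--     return new
-- ===== SOURCE B (Python) =====
-- def flick_switch(lst):
--     # divide and conquer at the first "flick": constant True prefix, False at the
--     # flick itself, and the suffix answer computed recursively then negated wholesale
--     if "flick" not in lst: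
--         return [True] * len(lst)
--     i = lst.index("flick")
--     return [True] * i + [False] + [not b for b in flick_switch(lst[i + 1:])]
-- ===== Notes on version B (the rewrite author's own statement) =====
-- stated objective: alternative
-- what changed: B replaces A's single toggle-state loop by a divide-and-conquer recursion: split at the first 'flick' (list.index), emit a constant True run for the prefix, False at the flick, and recurse on the suffix, negating the recursive answer wholesale.
import Mathlib
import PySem

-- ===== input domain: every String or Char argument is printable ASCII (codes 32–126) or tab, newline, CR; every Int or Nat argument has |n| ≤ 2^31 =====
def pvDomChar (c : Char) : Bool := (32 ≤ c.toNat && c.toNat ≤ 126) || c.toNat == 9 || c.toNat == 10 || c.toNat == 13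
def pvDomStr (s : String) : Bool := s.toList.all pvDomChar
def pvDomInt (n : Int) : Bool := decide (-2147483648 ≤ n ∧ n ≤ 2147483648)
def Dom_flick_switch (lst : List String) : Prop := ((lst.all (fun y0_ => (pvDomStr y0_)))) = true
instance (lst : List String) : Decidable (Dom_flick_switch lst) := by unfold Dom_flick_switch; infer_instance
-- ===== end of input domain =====

-- B is a divide-and-conquer recursion at the first "flick" instead of A's toggle loop; equal on all inputs.

-- ===== PORT A =====
-- A: one loop carrying (switch, new); toggle branch chain, then append branch chain.
def flick_switch (lst : List String) : List Bool :=
  (lst.foldl (fun (st : Nat × List Bool) item =>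
      let switch :=
        if item = "flick" ∧ st.1 = 0 then 1
        else if item = "flick" ∧ st.1 = 1 then 0
        else st.1
      (switch, st.2 ++ (if switch = 0 then [true] else if switch = 1 then [false] else [])))
    (0, [])).2

-- ===== PORT B =====
-- B: split at the first "flick" (list.index); True-run prefix, False at the flick,
-- recurse on the suffix lst[i+1:] and negate the recursive answer wholesale.
def flick_switch_alt (lst : List String) : List Bool :=
  match h : PySem.List.index? lst "flick" with
  | none => List.replicate lst.length true
  | some i =>
    List.replicate i true ++ [false] ++ (flick_switch_alt (PySem.List.slice lst (some ((i : Int) + 1)) none)).map (fun b => !b)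
termination_by lst.length
decreasing_by
  obtain ⟨hk, -, -⟩ := PySem.List.getElem_of_index?_eq_some h
  rw [PySem.List.slice_from _ (by positivity)]
  simp only [List.length_drop]
  omega

-- ===== PRECONDITION & SPEC =====
def Spec_flick_switch (lst : List String) (out : List Bool) : Prop := out = flick_switch_alt lst
instance (lst : List String) (out : List Bool) : Decidable (Spec_flick_switch lst out) := by unfold Spec_flick_switch; infer_instance

-- ===== CLAIM (what is proved, stated in full; the proofs are below) =====
def Claim_equal_flick_switch : Prop := ∀ (lst : List String), Dom_flick_switch lst → Spec_flick_switch lst (flick_switch lst)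

-- ===== LEMMAS AND PROOFS =====

-- common reference: list of parities of prefix counts starting from count c
def fsRef (lst : List String) (c : Nat) : List Bool :=
  match lst with
  | [] => []
  | x :: xs =>
    let c' := c + (if x = "flick" then 1 else 0)
    decide (c' % 2 = 0) :: fsRef xs c'

theorem fsA_loop (lst : List String) : ∀ (c : Nat) (acc : List Bool),
    (lst.foldl (fun (st : Nat × List Bool) item =>
      let switch :=
        if item = "flick" ∧ st.1 = 0 then 1
        else if item = "flick" ∧ st.1 = 1 then 0
        else st.1
      (switch, st.2 ++ (if switch = 0 then [true] else if switch = 1 then [false] else [])))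
      (c % 2, acc)).2 = acc ++ fsRef lst c := by
  induction lst with
  | nil => intro c acc; simp [fsRef]
  | cons x xs ih =>
    intro c acc
    simp only [List.foldl_cons, fsRef]
    by_cases hx : x = "flick"
    · rcases Nat.mod_two_eq_zero_or_one c with hc | hc
      · have h1 : (c + 1) % 2 = 1 := by omega
        simpa [hx, hc, h1] using ih (c + 1) (acc ++ [false])
      · have h0 : (c + 1) % 2 = 0 := by omega
        simpa [hx, hc, h0] using ih (c + 1) (acc ++ [true])
    · rcases Nat.mod_two_eq_zero_or_one c with hc | hc
      · simpa [hx, hc] using ih c (acc ++ [true])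
      · simpa [hx, hc] using ih c (acc ++ [false])

-- shifting the starting count by one negates every emitted parity
theorem fsRef_succ (lst : List String) : ∀ c, fsRef lst (c + 1) = (fsRef lst c).map (fun b => !b) := by
  induction lst with
  | nil => intro c; simp [fsRef]
  | cons x xs ih =>
    intro c
    simp only [fsRef, List.map_cons, List.cons.injEq]
    refine ⟨?_, by rw [Nat.add_right_comm c 1, ih]⟩
    rcases Nat.mod_two_eq_zero_or_one (c + if x = "flick" then 1 else 0) with hc | hc
    · have h1 : (c + 1 + (if x = "flick" then 1 else 0)) % 2 = 1 := by omega
      simp [h1, hc]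
    · have h0 : (c + 1 + (if x = "flick" then 1 else 0)) % 2 = 0 := by omega
      simp [h0, hc]

-- on a flick-free list the output from even count is all True
theorem fsRef_no_flick (lst : List String) (h : "flick" ∉ lst) :
    fsRef lst 0 = List.replicate lst.length true := by
  induction lst with
  | nil => simp [fsRef]
  | cons x xs ih =>
    have hx : x ≠ "flick" := fun e => h (e ▸ List.mem_cons_self ..)
    simp only [fsRef, hx]
    simp [ih (fun m => h (List.mem_cons_of_mem _ m)), List.replicate_succ]

-- flick-free prefix splits off as a True run
theorem fsRef_split (pre rest : List String) (h : "flick" ∉ pre) :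
    fsRef (pre ++ rest) 0 = List.replicate pre.length true ++ fsRef rest 0 := by
  induction pre with
  | nil => simp
  | cons x xs ih =>
    have hx : x ≠ "flick" := fun e => h (e ▸ List.mem_cons_self ..)
    simp only [List.cons_append, fsRef, hx]
    simp [ih (fun m => h (List.mem_cons_of_mem _ m)), List.replicate_succ]

theorem fsB_eq : ∀ (n : Nat) (lst : List String), lst.length ≤ n →
    flick_switch_alt lst = fsRef lst 0 := by
  intro n
  induction n with
  | zero =>
    intro lst hl
    have : lst = [] := List.eq_nil_of_length_eq_zero (Nat.le_zero.mp hl)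
    subst this
    rw [flick_switch_alt]
    simp [fsRef]
  | succ n ih =>
    intro lst hl
    rw [flick_switch_alt]
    split
    · rename_i h
      rw [fsRef_no_flick lst ((PySem.List.index?_eq_none_iff lst "flick").mp h)]
    · rename_i i h
      obtain ⟨pre, suf, heq, hlen, hpre⟩ := (PySem.List.index?_eq_some_iff lst "flick" i).mp h
      have hslice : PySem.List.slice lst (some ((i : Int) + 1)) none = suf := by
        rw [PySem.List.slice_from _ (by positivity), heq, ← hlen]
        have ht : (((pre.length : Nat) : Int) + 1).toNat = pre.length + 1 := by omega
        rw [ht]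
        simp [List.drop_append]
      rw [hslice, ih suf (by subst heq; simp at hl; omega)]
      subst heq
      rw [fsRef_split pre ("flick" :: suf) hpre, hlen]
      have : fsRef ("flick" :: suf) 0 = false :: (fsRef suf 0).map (fun b => !b) := by
        have h1 := fsRef_succ suf 0
        norm_num at h1
        simp only [fsRef]
        norm_num [h1]
      simp [this]

-- ===== VERDICT (by name: the statement is the Claim_ definition above) =====
theorem flick_switch_spec : Claim_equal_flick_switch := by
  intro lst _
  show flick_switch lst = flick_switch_alt lst
  have hA : flick_switch lst = fsRef lst 0 := by
    simpa [flick_switch] using fsA_loop lst 0 []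
  rw [hA, fsB_eq lst.length lst le_rfl]
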